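-- pv_equiv track=rewrite | github.com/pbrito10/industrial-task-recognition | analysis/session_analysis.py | _col_names
-- ===== SOURCE A (Python) =====
-- def _col_names(expected_order: list[str]) -> list[str]:
--     """Gera nomes únicos para zonas repetidas (ex: Montagem → Montagem_1, Montagem_2...)."""
--     totals: dict[str, int] = {}
--     for zone in expected_order:
--         totals[zone] = totals.get(zone, 0) + 1
--
--     count: dict[str, int] = {}
--     names = []
--     for zone in expected_order:
--         count[zone] = count.get(zone, 0) + 1
--         names.append(f"{zone}_{count[zone]}" if totals[zone] > 1 else zone)
--     return names
-- ===== SOURCE B (Python) =====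
-- def _col_names(expected_order: list[str]) -> list[str]:
--     """Gera nomes únicos para zonas repetidas (ex: Montagem → Montagem_1, Montagem_2...)."""
--     groups: dict[str, list[int]] = {}
--     for i, zone in enumerate(expected_order):
--         groups.setdefault(zone, []).append(i)
--     result = [""] * len(expected_order)
--     for zone, idxs in groups.items():
--         if len(idxs) == 1:
--             result[idxs[0]] = zone
--         else:
--             for n, i in enumerate(idxs, 1):
--                 result[i] = f"{zone}_{n}"
--     return result
-- ===== Notes on version B (the rewrite author's own statement) =====
-- stated objective: alternative
-- what changed: Instead of A's two counting passes over the list, B builds in one enumerate pass a dict mapping each zone to its list of positions, preallocates the result, and fills it group by group (bare name for a singleton group, zone_n by enumerating the group's positions from 1).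
import Mathlib
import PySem

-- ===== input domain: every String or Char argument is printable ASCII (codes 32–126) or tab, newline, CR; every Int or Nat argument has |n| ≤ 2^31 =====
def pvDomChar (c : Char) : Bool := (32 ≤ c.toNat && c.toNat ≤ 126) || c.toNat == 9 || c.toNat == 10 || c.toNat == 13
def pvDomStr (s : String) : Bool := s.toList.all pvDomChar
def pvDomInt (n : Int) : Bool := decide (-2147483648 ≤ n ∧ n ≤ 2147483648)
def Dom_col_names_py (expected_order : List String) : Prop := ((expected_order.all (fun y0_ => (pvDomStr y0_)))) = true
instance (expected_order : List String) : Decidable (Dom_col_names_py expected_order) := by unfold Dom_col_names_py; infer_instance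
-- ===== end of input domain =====

-- B replaces A's two counting passes by a group-by: one enumerate pass builds zone → positions,
-- then a preallocated result is filled group by group (alternative decomposition, same O(n) cost).


-- f"{zone}_{n}" (shared literal f-string of both Pythons)
def pvSuffix (zone : String) (n : Int) : String := zone ++ "_" ++ PySem.Int.toStr n

-- ===== PORT A =====
def col_names_py (expected_order : List String) : List String :=
  -- totals[zone] = totals.get(zone, 0) + 1
  let totals : PySem.Dict String Int :=
    expected_order.foldl (fun d zone => d.modify zone 0 (fun c => c + 1)) PySem.Dict.empty
  -- second loop: count dict + names accumulator (totals[zone] is always a present key, so getD is exact)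
  (expected_order.foldl
    (fun (st : PySem.Dict String Int × List String) zone =>
      let count := st.1.modify zone 0 (fun c => c + 1)
      (count, st.2 ++ [if totals.getD zone 0 > 1 then pvSuffix zone (count.getD zone 0) else zone]))
    (PySem.Dict.empty, [])).2

-- ===== PORT B =====
-- result[idxs[0]] = zone / result[i] = f"{zone}_{n}": the stored indices come from enumerate, so they
-- are nonnegative and in range (toNat is exact); a group list is nonempty by construction, so headD's
-- default is never used.
def pvWriteGroup (res : List String) (zone : String) (idxs : List Int) : List String :=
  if idxs.length == 1 then
    res.set (idxs.headD 0).toNat zone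
  else
    (PySem.List.enumerate idxs 1).foldl (fun r p => r.set p.2.toNat (pvSuffix zone p.1)) res

def col_names_py_alt (expected_order : List String) : List String :=
  -- groups.setdefault(zone, []).append(i)  ≡  groups[zone] = groups.get(zone, []) + [i]
  let groups : PySem.Dict String (List Int) :=
    (PySem.List.enumerate expected_order 0).foldl
      (fun d p => d.modify p.2 [] (fun l => l ++ [p.1])) PySem.Dict.empty
  groups.items.foldl (fun res p => pvWriteGroup res p.1 p.2)
    (List.replicate expected_order.length "")

-- ===== PRECONDITION & SPEC =====
def Spec_col_names_py (expected_order : List String) (out : List String) : Prop := out = col_names_py_alt expected_order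
instance (expected_order : List String) (out : List String) : Decidable (Spec_col_names_py expected_order out) := by unfold Spec_col_names_py; infer_instance

-- ===== CLAIM (what is proved, stated in full; the proofs are below) =====
def Claim_equal_col_names_py : Prop := ∀ (expected_order : List String), Dom_col_names_py expected_order → Spec_col_names_py expected_order (col_names_py expected_order)

-- ===== LEMMAS AND PROOFS =====

-- the value both programs put at position i (c is the number of occurrences of w in xs.take (i+1))
def pvNameAt (xs : List String) (w : String) (c : Nat) : String :=
  if ((xs.count w : Int)) > 1 then pvSuffix w (c : Int) else w

-- ---- A side ----
def pvGoA (t : PySem.Dict String Int) (l : List String) (d : PySem.Dict String Int) : List String :=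
  match l with
  | [] => []
  | z :: r =>
      (if t.getD z 0 > 1 then pvSuffix z (d.getD z 0 + 1) else z) :: pvGoA t r (d.modify z 0 (fun c => c + 1))

theorem pvA_fold (t : PySem.Dict String Int) :
    ∀ (l : List String) (d : PySem.Dict String Int) (acc : List String),
    (l.foldl
      (fun (st : PySem.Dict String Int × List String) zone =>
        let count := st.1.modify zone 0 (fun c => c + 1)
        (count, st.2 ++ [if t.getD zone 0 > 1 then pvSuffix zone (count.getD zone 0) else zone]))
      (d, acc)).2 = acc ++ pvGoA t l d := by
  intro l
  induction l with
  | nil => intro d acc; simp [pvGoA]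
  | cons z r ih =>
    intro d acc
    simp only [List.foldl_cons]
    rw [ih]
    simp [pvGoA, PySem.Dict.getD_modify_self]

theorem pvGoA_length (t : PySem.Dict String Int) (l : List String) :
    ∀ d, (pvGoA t l d).length = l.length := by
  induction l with
  | nil => intro d; simp [pvGoA]
  | cons z r ih => intro d; simp [pvGoA, ih]

theorem pvGoA_getElem? (t : PySem.Dict String Int) (l : List String) :
    ∀ (d : PySem.Dict String Int) (i : Nat) (h : i < l.length),
    (pvGoA t l d)[i]? =
      some (if t.getD (l[i]) 0 > 1
            then pvSuffix (l[i]) (d.getD (l[i]) 0 + ((l.take (i+1)).count (l[i]) : Int))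
            else l[i]) := by
  induction l with
  | nil => intro d i h; simp at h
  | cons z r ih =>
    intro d i h
    cases i with
    | zero =>
      simp [pvGoA]
    | succ i =>
      have h' : i < r.length := by simpa using h
      simp only [pvGoA, List.getElem?_cons_succ, List.getElem_cons_succ]
      rw [ih _ i h']
      have harg : (d.modify z 0 (fun c => c + 1)).getD (r[i]) 0 + ((r.take (i+1)).count (r[i]) : Int)
          = d.getD (r[i]) 0 + ((((z :: r).take (i+1+1)).count (r[i]) : Int)) := by
        rw [PySem.Dict.getD_modify, List.take_succ_cons, List.count_cons]
        by_cases hw : r[i] = z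
        · subst hw; simp; ring
        · simp [hw, Ne.symm hw]
      rw [harg]

theorem pvA_length (xs : List String) : (col_names_py xs).length = xs.length := by
  unfold col_names_py
  rw [pvA_fold]
  simp [pvGoA_length]

theorem pvA_getElem? (xs : List String) (i : Nat) (h : i < xs.length) :
    (col_names_py xs)[i]? = some (pvNameAt xs (xs[i]) ((xs.take (i+1)).count (xs[i]))) := by
  unfold col_names_py
  rw [pvA_fold]
  simp only [List.nil_append]
  rw [pvGoA_getElem? _ _ _ i h]
  simp [pvNameAt, PySem.Dict.getD_foldl_modify_add_one, PySem.Dict.getD_empty]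

-- ---- B side ----
-- the list of (Int) positions of z in xs, offset by s
def pvG (xs : List String) (s : Int) (z : String) : List Int :=
  ((PySem.List.enumerate xs s).filter (fun p => p.2 == z)).map (fun p => p.1)

theorem pvG_cons (x : String) (xs : List String) (s : Int) (z : String) :
    pvG (x :: xs) s z = (if x == z then [s] else []) ++ pvG xs (s+1) z := by
  by_cases h : x == z <;> simp [pvG, PySem.List.enumerate_cons, h]

theorem pvG_length (xs : List String) (z : String) : ∀ s, (pvG xs s z).length = xs.count z := by
  induction xs with
  | nil => intro s; simp [pvG]
  | cons x xs ih =>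
    intro s
    rw [pvG_cons, List.count_cons]
    by_cases h : x == z <;> simp [h, ih]

theorem pvG_rank (xs : List String) (z : String) :
    ∀ (s : Int) (i : Nat) (h : i < xs.length), xs[i] = z →
    (pvG xs s z)[(xs.take i).count z]? = some (s + i) := by
  induction xs with
  | nil => intro s i h; simp at h
  | cons x xs ih =>
    intro s i h hz
    rw [pvG_cons]
    cases i with
    | zero =>
      simp at hz
      simp [hz]
    | succ i =>
      have h' : i < xs.length := by simpa using h
      simp only [List.getElem_cons_succ] at hz
      rw [List.take_succ_cons, List.count_cons]
      by_cases hx : x == z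
      · simp only [hx, if_pos]
        rw [List.getElem?_append_right (by simp)]
        simp only [List.length_cons, List.length_nil]
        have := ih (s+1) i h' hz
        rw [show (xs.take i).count z + 1 - 1 = (xs.take i).count z by omega, this]
        congr 1
        push_cast
        ring
      · simp only [hx, if_neg, Bool.false_eq_true, not_false_iff, List.nil_append]
        rw [show (xs.take i).count z + 0 = (xs.take i).count z by omega]
        rw [ih (s+1) i h' hz]
        congr 1
        push_cast
        ring

theorem pvG_mem (xs : List String) (z : String) :
    ∀ (s : Int) (a : Int), a ∈ pvG xs s z → ∃ (k : Nat), a = s + k ∧ xs[k]? = some z := by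
  induction xs with
  | nil => intro s a ha; simp [pvG] at ha
  | cons x xs ih =>
    intro s a ha
    rw [pvG_cons] at ha
    rcases List.mem_append.mp ha with h1 | h2
    · by_cases hx : x == z
      · simp [hx] at h1
        refine ⟨0, by simpa using h1, ?_⟩
        simp at hx
        simp [hx]
      · simp [hx] at h1
    · obtain ⟨k, hk, hget⟩ := ih (s+1) a h2
      exact ⟨k+1, by push_cast; omega, by simpa using hget⟩

theorem pvG_pairwise (xs : List String) (z : String) :
    ∀ s, (pvG xs s z).Pairwise (· < ·) := by
  induction xs with
  | nil => intro s; simp [pvG]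
  | cons x xs ih =>
    intro s
    rw [pvG_cons]
    by_cases hx : x == z
    · simp only [hx, if_pos, List.singleton_append]
      refine List.pairwise_cons.mpr ⟨?_, ih (s+1)⟩
      intro b hb
      obtain ⟨k, hk, -⟩ := pvG_mem xs z (s+1) b hb
      omega
    · simpa [hx] using ih (s+1)

theorem pv_fold_set_length (f : Int → String) :
    ∀ (ps : List (Int × Int)) (res : List String),
    (ps.foldl (fun r p => r.set p.2.toNat (f p.1)) res).length = res.length := by
  intro ps
  induction ps with
  | nil => intro res; simp
  | cons p ps ih => intro res; simp [ih, List.length_set]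

theorem pv_fold_set_untouched (f : Int → String) :
    ∀ (ps : List (Int × Int)) (res : List String) (i : Nat),
    (∀ p ∈ ps, p.2.toNat ≠ i) →
    (ps.foldl (fun r p => r.set p.2.toNat (f p.1)) res)[i]? = res[i]? := by
  intro ps
  induction ps with
  | nil => intro res i _; simp
  | cons p ps ih =>
    intro res i hne
    rw [List.foldl_cons, ih _ _ (fun q hq => hne q (List.mem_cons_of_mem _ hq)),
        List.getElem?_set_ne (hne p (List.mem_cons_self))]

theorem pv_fold_set_hit (f : Int → String) (ps : List (Int × Int)) (res : List String)
    (c : Nat) (r a : Int) (hc : ps[c]? = some (r, a)) (hlen : a.toNat < res.length)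
    (hafter : ∀ (j : Nat) (hj : j < ps.length), c < j → (ps[j]).2.toNat ≠ a.toNat) :
    (ps.foldl (fun rr p => rr.set p.2.toNat (f p.1)) res)[a.toNat]? = some (f r) := by
  obtain ⟨hcl, hval⟩ := List.getElem?_eq_some_iff.mp hc
  have hsplit : ps = ps.take c ++ ps[c] :: ps.drop (c+1) := by
    rw [List.getElem_cons_drop hcl, List.take_append_drop]
  conv_lhs => rw [hsplit]
  rw [List.foldl_append, List.foldl_cons, hval]
  rw [pv_fold_set_untouched]
  · rw [List.getElem?_set_self]
    rw [pv_fold_set_length]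
    exact hlen
  · intro p hp
    obtain ⟨k, hk, hpk⟩ := List.mem_iff_getElem.mp hp
    rw [← hpk, List.getElem_drop]
    have hkl : c + 1 + k < ps.length := by
      have := hk; rw [List.length_drop] at this; omega
    exact hafter (c+1+k) hkl (by omega)

theorem pvWriteGroup_length (res : List String) (zone : String) (idxs : List Int) :
    (pvWriteGroup res zone idxs).length = res.length := by
  unfold pvWriteGroup
  split_ifs
  · exact List.length_set
  · exact pv_fold_set_length _ _ _

theorem pvWriteGroup_hit (xs : List String) (z : String) (i : Nat) (h : i < xs.length)
    (hz : xs[i] = z) (res : List String) (hres : res.length = xs.length) :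
    (pvWriteGroup res z (pvG xs 0 z))[i]? = some (pvNameAt xs z ((xs.take (i+1)).count z)) := by
  have hmem : z ∈ xs := hz ▸ List.getElem_mem h
  have hcnt : 0 < xs.count z := List.count_pos_iff.mpr hmem
  have hrank := pvG_rank xs z 0 i h hz
  simp only [Int.zero_add] at hrank
  have hlenG : (pvG xs 0 z).length = xs.count z := pvG_length xs z 0
  have hrlt : (xs.take i).count z < xs.count z := by
    rcases List.getElem?_eq_some_iff.mp hrank with ⟨hh, -⟩
    omega
  have htake : (xs.take (i+1)).count z = (xs.take i).count z + 1 := by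
    rw [List.take_add_one, List.count_append]
    rw [List.getElem?_eq_getElem h, hz]
    simp
  unfold pvWriteGroup
  by_cases h1 : xs.count z = 1
  · have hL1 : (pvG xs 0 z).length = 1 := by omega
    obtain ⟨b, hb⟩ := List.length_eq_one_iff.mp hL1
    have hr0 : (xs.take i).count z = 0 := by omega
    rw [hr0, hb] at hrank
    simp only [List.getElem?_cons_zero, Option.some.injEq] at hrank
    rw [hb]
    simp only [List.length_cons, List.length_nil, beq_self_eq_true, if_pos, List.headD_cons, hrank,
      Int.toNat_natCast]
    rw [List.getElem?_set_self (by omega)]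
    simp [pvNameAt, h1]
  · have hne1 : ((pvG xs 0 z).length == 1) = false := by
      simp only [beq_eq_false_iff_ne, ne_eq]
      omega
    rw [if_neg (by simp [hne1])]
    have hps : (PySem.List.enumerate (pvG xs 0 z) 1)[(xs.take i).count z]? =
        some (1 + ((xs.take i).count z : Int), (i : Int)) := by
      rw [PySem.List.getElem?_enumerate, hrank]
      rfl
    have hmain := pv_fold_set_hit (fun n => pvSuffix z n) (PySem.List.enumerate (pvG xs 0 z) 1)
      res ((xs.take i).count z) (1 + ((xs.take i).count z : Int)) (i : Int) hps
      (by simp only [Int.toNat_natCast]; omega)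
      ?_
    · simpa [pvNameAt, htake, pvSuffix, add_comm,
        show (1:Int) < (xs.count z : Int) by omega] using hmain
    · intro j hj hcj
      rw [PySem.List.length_enumerate] at hj
      rw [PySem.List.getElem_enumerate (h := by rwa [PySem.List.length_enumerate])]
      have hpw := (List.pairwise_iff_getElem.mp (pvG_pairwise xs z 0)) _ j
        (by omega) (by omega) hcj
      rcases List.getElem?_eq_some_iff.mp hrank with ⟨hh, hval⟩
      rw [hval] at hpw
      have hnn : 0 ≤ (pvG xs 0 z)[j] := by omega
      omega

theorem pvWriteGroup_miss (xs : List String) (z : String) (i : Nat)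
    (hz : xs[i]? ≠ some z) (res : List String) :
    (pvWriteGroup res z (pvG xs 0 z))[i]? = res[i]? := by
  have hkey : ∀ b ∈ pvG xs 0 z, b.toNat ≠ i := by
    intro b hb
    obtain ⟨k, hk, hget⟩ := pvG_mem xs z 0 b hb
    have : k ≠ i := by
      intro hki
      exact hz (hki ▸ hget)
    omega
  unfold pvWriteGroup
  split_ifs with hl
  · obtain ⟨b, hb⟩ := List.length_eq_one_iff.mp (by simpa using hl)
    rw [hb]
    simp only [List.headD_cons]
    exact List.getElem?_set_ne (hkey b (hb ▸ List.mem_cons_self))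
  · apply pv_fold_set_untouched
    intro p hp
    obtain ⟨k, hk, hpk⟩ := (PySem.List.mem_enumerate_iff _ _ _).mp hp
    have : p.2 ∈ pvG xs 0 z := by rw [hpk]; exact List.getElem_mem hk
    exact hkey _ this

theorem pv_outer_length (xs : List String) :
    ∀ (ks : List String) (res : List String),
    (ks.foldl (fun r z => pvWriteGroup r z (pvG xs 0 z)) res).length = res.length := by
  intro ks
  induction ks with
  | nil => intro res; simp
  | cons k ks ih => intro res; rw [List.foldl_cons, ih, pvWriteGroup_length]

theorem pv_outer_untouched (xs : List String) (i : Nat) :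
    ∀ (ks : List String) (res : List String), (∀ w ∈ ks, xs[i]? ≠ some w) →
    (ks.foldl (fun r z => pvWriteGroup r z (pvG xs 0 z)) res)[i]? = res[i]? := by
  intro ks
  induction ks with
  | nil => intro res _; simp
  | cons k ks ih =>
    intro res hne
    rw [List.foldl_cons, ih _ (fun w hw => hne w (List.mem_cons_of_mem _ hw)),
        pvWriteGroup_miss xs k i (hne k List.mem_cons_self)]

theorem pv_outer (xs : List String) (i : Nat) (hi : i < xs.length) :
    ∀ (ks : List String), ks.Nodup → xs[i] ∈ ks →
    ∀ (res : List String), res.length = xs.length →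
    (ks.foldl (fun r z => pvWriteGroup r z (pvG xs 0 z)) res)[i]? =
      some (pvNameAt xs (xs[i]) ((xs.take (i+1)).count (xs[i]))) := by
  intro ks
  induction ks with
  | nil => intro _ hmem; simp at hmem
  | cons k ks ih =>
    intro hnd hmem res hres
    rw [List.foldl_cons]
    by_cases hk : k = xs[i]
    · rw [pv_outer_untouched xs i ks _ ?_]
      · rw [← hk]
        exact pvWriteGroup_hit xs k i hi hk.symm res hres
      · intro w hw hcontra
        have : k = w := by
          rw [List.getElem?_eq_getElem hi] at hcontra
          rw [hk]
          exact Option.some.inj hcontra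
        exact (List.nodup_cons.mp hnd).1 (this ▸ hw)
    · have hmem' : xs[i] ∈ ks := by
        rcases List.mem_cons.mp hmem with h1 | h2
        · exact absurd h1.symm hk
        · exact h2
      rw [ih (List.nodup_cons.mp hnd).2 hmem' _ (by rw [pvWriteGroup_length]; exact hres)]

theorem pvB_eq_keysFold (xs : List String) :
    col_names_py_alt xs =
      (PySem.Set.ofList xs).foldl (fun r z => pvWriteGroup r z (pvG xs 0 z))
        (List.replicate xs.length "") := by
  have hrfl : col_names_py_alt xs =
      ((PySem.List.enumerate xs 0).foldl
        (fun d p => d.modify p.2 [] (fun l => l ++ [p.1])) PySem.Dict.empty).items.foldl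
        (fun res p => pvWriteGroup res p.1 p.2) (List.replicate xs.length "") := rfl
  rw [hrfl]
  have hnd : ((PySem.List.enumerate xs 0).foldl
      (fun d p => d.modify p.2 [] (fun l => l ++ [p.1])) PySem.Dict.empty).keys.Nodup := by
    exact PySem.Dict.nodup_keys_foldl_modify_key _ (fun (p : Int × String) => p.2) []
      (fun d (p : Int × String) (L : List Int) => L ++ [p.1]) _ (by simp)
  have hkeys : ((PySem.List.enumerate xs 0).foldl
      (fun d p => d.modify p.2 [] (fun l => l ++ [p.1])) PySem.Dict.empty).keys =
      PySem.Set.ofList xs := by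
    rw [PySem.Dict.keys_foldl_modify_key _ (fun (p : Int × String) => p.2) []
      (fun d (p : Int × String) (L : List Int) => L ++ [p.1]) _]
    rw [PySem.List.map_snd_enumerate, PySem.Dict.keys_empty]
    simp [PySem.Set.update, PySem.Set.ofList_eq_foldl]
  have hgetD : ∀ k, ((PySem.List.enumerate xs 0).foldl
      (fun d p => d.modify p.2 [] (fun l => l ++ [p.1])) PySem.Dict.empty).getD k [] =
      pvG xs 0 k := by
    intro k
    have hfold : (PySem.List.enumerate xs 0).foldl
        (fun d p => d.modify p.2 [] (fun l => l ++ [p.1])) PySem.Dict.empty =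
        ((PySem.List.enumerate xs 0).map Prod.swap).foldl
          (fun d p => d.modify p.1 [] (fun l => l ++ [p.2])) PySem.Dict.empty := by
      rw [List.foldl_map]
      simp
    rw [hfold, PySem.Dict.getD_foldl_modify_append]
    simp [pvG, List.filter_map, List.map_map, Function.comp_def, PySem.Dict.getD_empty]
  rw [PySem.Dict.items_eq_map_keys _ hnd [], List.foldl_map]
  dsimp only
  simp only [hgetD, hkeys]

theorem pvB_length (xs : List String) : (col_names_py_alt xs).length = xs.length := by
  rw [pvB_eq_keysFold, pv_outer_length]
  simp

theorem pvB_getElem? (xs : List String) (i : Nat) (h : i < xs.length) :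
    (col_names_py_alt xs)[i]? = some (pvNameAt xs (xs[i]) ((xs.take (i+1)).count (xs[i]))) := by
  rw [pvB_eq_keysFold]
  exact pv_outer xs i h (PySem.Set.ofList xs) (PySem.Set.nodup_ofList xs)
    ((PySem.Set.mem_ofList xs _).mpr (List.getElem_mem h)) _ (by simp)

-- ===== VERDICT (by name: the statement is the Claim_ definition above) =====
theorem col_names_py_spec : Claim_equal_col_names_py := by
  intro xs _
  unfold Spec_col_names_py
  apply List.ext_getElem?
  intro i
  by_cases h : i < xs.length
  · rw [pvA_getElem? xs i h, pvB_getElem? xs i h]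
  · rw [List.getElem?_eq_none (by rw [pvA_length]; omega),
        List.getElem?_eq_none (by rw [pvB_length]; omega)]
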